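-- pv_equiv track=rewrite | github.com/nitsugahcram/algorithms-trainer | greedy/validStartingCity/solution2.py | validStartingCity
-- ===== SOURCE A (Python) =====
-- def validStartingCity(distances, fuel, mpg):
--     # Write your code here.
--     numberOfCities = len(distances)
--     milesRemaining = 0
--     indexOfStartingCity = 0
--     milesRemainingAtStartingCity = 0
--
--     for idx in range(1, numberOfCities):
--         distanceFromPreviousCity = distances[idx - 1]
--         fuelFromAvailable = fuel[idx - 1]
--         milesRemaining += fuelFromAvailable * mpg - distanceFromPreviousCity
--         if milesRemainingAtStartingCity > milesRemaining:
--             milesRemainingAtStartingCity = milesRemaining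
--             indexOfStartingCity = idx
--
--     return indexOfStartingCity
-- ===== SOURCE B (Python) =====
-- def validStartingCity(distances, fuel, mpg):
--     # Back-to-front suffix fold: solve each suffix of the delta list and combine.
--     # If (i, v) is the (first-argmin index, min value) of the prefix sums of a
--     # suffix, prepending delta d gives (i + 1, d + v) when d + v < 0, else (0, 0).
--     deltas = [fuel[i] * mpg - distances[i] for i in range(len(distances) - 1)]
--     best_i, best_v = 0, 0
--     for d in reversed(deltas):
--         v = d + best_v
--         if v < 0:
--             best_i, best_v = best_i + 1, v
--         else:
--             best_i, best_v = 0, 0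
--     return best_i
-- ===== Notes on version B (the rewrite author's own statement) =====
-- stated objective: alternative
-- what changed: Replaces A's forward scan carrying a running cumulative sum plus a running minimum with a back-to-front fold that solves each suffix of the delta list and combines: the pair (first-argmin index, min prefix value) of a suffix is extended by one prepended delta at a time.
import Mathlib
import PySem

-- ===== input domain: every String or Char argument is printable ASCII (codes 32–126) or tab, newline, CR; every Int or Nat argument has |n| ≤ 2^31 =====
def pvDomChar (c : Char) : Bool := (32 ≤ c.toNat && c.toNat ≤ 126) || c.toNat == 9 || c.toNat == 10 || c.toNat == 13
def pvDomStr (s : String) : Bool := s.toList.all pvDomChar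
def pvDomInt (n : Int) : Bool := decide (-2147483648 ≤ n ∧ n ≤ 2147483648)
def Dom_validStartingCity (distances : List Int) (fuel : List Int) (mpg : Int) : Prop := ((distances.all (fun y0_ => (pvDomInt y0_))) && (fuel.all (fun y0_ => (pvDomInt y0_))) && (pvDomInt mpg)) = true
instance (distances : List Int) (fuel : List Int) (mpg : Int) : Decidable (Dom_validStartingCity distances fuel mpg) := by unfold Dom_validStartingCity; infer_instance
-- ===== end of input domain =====

-- B replaces A's forward running-sum + running-min scan by a back-to-front fold
-- that solves each suffix of the delta list and combines suffix solutions.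

-- ===== PORT A =====
def validStartingCity (distances : List Int) (fuel : List Int) (mpg : Int) : Int :=
  let numberOfCities : Int := (distances.length : Int)
  -- state: (milesRemaining, indexOfStartingCity, milesRemainingAtStartingCity)
  let s := (PySem.List.pyRange 1 numberOfCities 1).foldl
    (fun (st : Int × Int × Int) idx =>
      let distanceFromPreviousCity := PySem.List.pyGetD distances (idx - 1) 0
      let fuelFromAvailable := PySem.List.pyGetD fuel (idx - 1) 0
      let milesRemaining := st.1 + fuelFromAvailable * mpg - distanceFromPreviousCity
      if st.2.2 > milesRemaining then (milesRemaining, idx, milesRemaining)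
      else (milesRemaining, st.2.1, st.2.2))
    (0, 0, 0)
  s.2.1

-- ===== PORT B =====
def validStartingCity_alt (distances : List Int) (fuel : List Int) (mpg : Int) : Int :=
  let deltas := (PySem.List.pyRange 0 ((distances.length : Int) - 1) 1).map
    (fun i => PySem.List.pyGetD fuel i 0 * mpg - PySem.List.pyGetD distances i 0)
  let s := deltas.reverse.foldl
    (fun (st : Int × Int) d =>
      let v := d + st.2
      if v < 0 then (st.1 + 1, v) else (0, 0))
    (0, 0)
  s.1

-- ===== PRECONDITION & SPEC =====
-- Pre_ excludes exactly the inputs where Python A raises IndexError (fuel shorter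
-- than len(distances) - 1); B raises there too.
def Pre_validStartingCity (distances : List Int) (fuel : List Int) (mpg : Int) : Prop :=
  distances.length ≤ fuel.length + 1
instance (distances : List Int) (fuel : List Int) (mpg : Int) : Decidable (Pre_validStartingCity distances fuel mpg) := by unfold Pre_validStartingCity; infer_instance
def pvWitness_validStartingCity : List Int × List Int × Int := ([4, 2, 3], [3, 1, 2], 2)

def Spec_validStartingCity (distances : List Int) (fuel : List Int) (mpg : Int) (out : Int) : Prop := out = validStartingCity_alt distances fuel mpg
instance (distances : List Int) (fuel : List Int) (mpg : Int) (out : Int) : Decidable (Spec_validStartingCity distances fuel mpg out) := by unfold Spec_validStartingCity; infer_instance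

-- ===== CLAIM (what is proved, stated in full; the proofs are below) =====
def Claim_equal_validStartingCity : Prop := ∀ (distances : List Int) (fuel : List Int) (mpg : Int), Dom_validStartingCity distances fuel mpg → Pre_validStartingCity distances fuel mpg → Spec_validStartingCity distances fuel mpg (validStartingCity distances fuel mpg)

-- ===== LEMMAS AND PROOFS =====

-- P k = cumulative miles remaining when arriving at city k (A's running sum)
def pvP (distances : List Int) (fuel : List Int) (mpg : Int) : Nat → Int
  | 0 => 0
  | k + 1 => pvP distances fuel mpg k + fuel.getD k 0 * mpg - distances.getD k 0

-- first-argmin of pvP over indices 0..m: (index, value), A's tracked pair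
def pvAm (distances : List Int) (fuel : List Int) (mpg : Int) : Nat → Int × Int
  | 0 => (0, 0)
  | k + 1 =>
    if pvP distances fuel mpg (k + 1) < (pvAm distances fuel mpg k).2
    then (((k : Int) + 1), pvP distances fuel mpg (k + 1))
    else pvAm distances fuel mpg k

theorem pv_foldA (distances fuel : List Int) (mpg : Int) (m : Nat) :
    (PySem.List.pyRange 1 ((m : Int) + 1) 1).foldl
      (fun (st : Int × Int × Int) idx =>
        let d := PySem.List.pyGetD distances (idx - 1) 0
        let f := PySem.List.pyGetD fuel (idx - 1) 0
        let mr := st.1 + f * mpg - d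
        if st.2.2 > mr then (mr, idx, mr) else (mr, st.2.1, st.2.2))
      (0, 0, 0)
    = (pvP distances fuel mpg m, (pvAm distances fuel mpg m).1, (pvAm distances fuel mpg m).2) := by
  induction m with
  | zero => simp [PySem.List.pyRange_one_eq_nil, pvP, pvAm]
  | succ k ih =>
    rw [show ((k + 1 : Nat) : Int) + 1 = ((k : Int) + 1) + 1 by push_cast; ring,
        PySem.List.pyRange_one_succ_right (show (1:Int) ≤ (k : Int) + 1 by omega),
        List.foldl_append, ih]
    simp only [List.foldl_cons, List.foldl_nil]
    have h1 : ((k : Int) + 1) - 1 = (k : Int) := by ring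
    simp only [h1, PySem.List.pyGetD_natCast]
    have hstep : pvP distances fuel mpg (k + 1)
        = pvP distances fuel mpg k + fuel.getD k 0 * mpg - distances.getD k 0 := rfl
    simp only [pvAm, gt_iff_lt, ← hstep]
    split <;> rfl

-- B's backward combine, as structural recursion on the delta list
def pvG : List Int → Int × Int
  | [] => (0, 0)
  | d :: ds =>
    if d + (pvG ds).2 < 0 then ((pvG ds).1 + 1, d + (pvG ds).2) else (0, 0)

theorem pvG_eq_foldr (ds : List Int) :
    ds.foldr (fun d (st : Int × Int) =>
        let v := d + st.2
        if v < 0 then (st.1 + 1, v) else (0, 0)) (0, 0) = pvG ds := by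
  induction ds with
  | nil => rfl
  | cons d ds ih => simp [pvG, ih]

-- characterization of pvG: first argmin (index, value) of the prefix sums of ds
theorem pvG_spec (ds : List Int) :
    0 ≤ (pvG ds).1 ∧ (pvG ds).1.toNat ≤ ds.length
    ∧ (pvG ds).2 = (ds.take (pvG ds).1.toNat).sum
    ∧ (∀ k, k ≤ ds.length → (pvG ds).2 ≤ (ds.take k).sum)
    ∧ (∀ k, k < (pvG ds).1.toNat → (pvG ds).2 < (ds.take k).sum) := by
  induction ds with
  | nil =>
    refine ⟨le_refl _, by simp [pvG], by simp [pvG], ?_, ?_⟩ <;> intro k hk <;>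
      simp [pvG] at hk ⊢
  | cons d ds ih =>
    obtain ⟨h0, hlen, hval, hmin, hstrict⟩ := ih
    simp only [pvG]
    by_cases hv : d + (pvG ds).2 < 0
    · rw [if_pos hv]
      have htn : ((pvG ds).1 + 1).toNat = (pvG ds).1.toNat + 1 := by omega
      refine ⟨by omega, by simp only [List.length_cons, htn]; omega, ?_, ?_, ?_⟩
      · rw [htn]; simp [List.take_succ_cons, hval]
      · intro k hk
        cases k with
        | zero => simpa using le_of_lt hv
        | succ j =>
          simp only [List.take_succ_cons, List.sum_cons]
          have := hmin j (by simpa using hk)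
          omega
      · intro k hk
        rw [htn] at hk
        cases k with
        | zero => simpa using hv
        | succ j =>
          simp only [List.take_succ_cons, List.sum_cons]
          have := hstrict j (by omega)
          omega
    · rw [if_neg hv]
      rw [not_lt] at hv
      refine ⟨le_refl _, by simp, by simp, ?_, ?_⟩
      · intro k hk
        cases k with
        | zero => simp
        | succ j =>
          simp only [List.take_succ_cons, List.sum_cons]
          have := hmin j (by simpa using hk)
          omega
      · intro k hk; simp at hk

-- characterization of pvAm: same first-argmin property w.r.t. pvP
theorem pvAm_spec (distances fuel : List Int) (mpg : Int) (m : Nat) :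
    0 ≤ (pvAm distances fuel mpg m).1 ∧ (pvAm distances fuel mpg m).1.toNat ≤ m
    ∧ (pvAm distances fuel mpg m).2 = pvP distances fuel mpg (pvAm distances fuel mpg m).1.toNat
    ∧ (∀ k, k ≤ m → (pvAm distances fuel mpg m).2 ≤ pvP distances fuel mpg k)
    ∧ (∀ k, k < (pvAm distances fuel mpg m).1.toNat → (pvAm distances fuel mpg m).2 < pvP distances fuel mpg k) := by
  induction m with
  | zero =>
    refine ⟨le_refl _, by simp [pvAm], by simp [pvAm, pvP], ?_, ?_⟩ <;> intro k hk
    · interval_cases k; simp [pvAm, pvP]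
    · simp [pvAm] at hk
  | succ n ih =>
    obtain ⟨h0, hlen, hval, hmin, hstrict⟩ := ih
    simp only [pvAm]
    by_cases hv : pvP distances fuel mpg (n + 1) < (pvAm distances fuel mpg n).2
    · rw [if_pos hv]
      refine ⟨by omega, by omega, by simp, ?_, ?_⟩
      · intro k hk
        rcases Nat.lt_succ_iff_lt_or_eq.mp (Nat.lt_succ_of_le hk) with h | h
        · have := hmin k (by omega)
          simp only; omega
        · subst h; simp
      · intro k hk
        have hk' : k ≤ n := by omega
        have := hmin k hk'
        simp only; omega
    · rw [if_neg hv]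
      rw [not_lt] at hv
      refine ⟨h0, by omega, hval, ?_, hstrict⟩
      intro k hk
      rcases Nat.lt_succ_iff_lt_or_eq.mp (Nat.lt_succ_of_le hk) with h | h
      · exact hmin k (by omega)
      · subst h; exact hv

-- the delta list B builds, and its prefix sums = pvP
theorem pv_take_sum (distances fuel : List Int) (mpg : Int) (m k : Nat) (hk : k ≤ m) :
    (((List.range m).map (fun i => fuel.getD i 0 * mpg - distances.getD i 0)).take k).sum
    = pvP distances fuel mpg k := by
  induction k with
  | zero => simp [pvP]
  | succ j ih =>
    have hj : j < m := by omega
    rw [List.take_add_one, List.sum_append, ih (by omega)]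
    have : ((List.range m).map (fun i => fuel.getD i 0 * mpg - distances.getD i 0))[j]?
        = some (fuel.getD j 0 * mpg - distances.getD j 0) := by
      rw [List.getElem?_map, List.getElem?_range hj]; rfl
    rw [this]
    simp [pvP]
    ring

-- first argmins agree: pvG on the delta list = pvAm
theorem pv_agree (distances fuel : List Int) (mpg : Int) (m : Nat) :
    (pvG ((List.range m).map (fun i => fuel.getD i 0 * mpg - distances.getD i 0))).1
    = (pvAm distances fuel mpg m).1 := by
  set ds := (List.range m).map (fun i => fuel.getD i 0 * mpg - distances.getD i 0) with hds
  have hlen : ds.length = m := by simp [hds]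
  obtain ⟨g0, glen, gval, gmin, gstrict⟩ := pvG_spec ds
  obtain ⟨a0, alen, aval, amin, astrict⟩ := pvAm_spec distances fuel mpg m
  rw [hlen] at glen gmin
  have gval' : (pvG ds).2 = pvP distances fuel mpg (pvG ds).1.toNat := by
    rw [gval, hds, pv_take_sum distances fuel mpg m _ glen]
  have gmin' : ∀ k, k ≤ m → (pvG ds).2 ≤ pvP distances fuel mpg k := by
    intro k hk
    have := gmin k (by omega)
    rwa [hds, pv_take_sum distances fuel mpg m k hk] at this
  have gstrict' : ∀ k, k < (pvG ds).1.toNat → (pvG ds).2 < pvP distances fuel mpg k := by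
    intro k hk
    have := gstrict k hk
    rwa [hds, pv_take_sum distances fuel mpg m k (by omega)] at this
  have heqv : (pvG ds).2 = (pvAm distances fuel mpg m).2 := by
    have h1 := gmin' (pvAm distances fuel mpg m).1.toNat alen
    have h2 := amin (pvG ds).1.toNat glen
    rw [← aval] at h1; rw [← gval'] at h2
    omega
  have htn : (pvG ds).1.toNat = (pvAm distances fuel mpg m).1.toNat := by
    by_contra hne
    rcases Nat.lt_or_ge (pvG ds).1.toNat (pvAm distances fuel mpg m).1.toNat with h | h
    · have := astrict (pvG ds).1.toNat h
      rw [← gval', heqv] at this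
      omega
    · have h' : (pvAm distances fuel mpg m).1.toNat < (pvG ds).1.toNat := by omega
      have := gstrict' (pvAm distances fuel mpg m).1.toNat h'
      rw [← aval, ← heqv] at this
      omega
  omega

-- ===== VERDICT (by name: the statement is the Claim_ definition above) =====
theorem validStartingCity_spec : Claim_equal_validStartingCity := by
  intro distances fuel mpg _ _
  unfold Spec_validStartingCity validStartingCity validStartingCity_alt
  cases hn : distances.length with
  | zero =>
    have hd : distances = [] := List.length_eq_zero_iff.mp hn
    subst hd
    simp [PySem.List.pyRange_one_eq_nil]
  | succ m =>
    dsimp only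
    have hc1 : ((m + 1 : Nat) : Int) = (m : Int) + 1 := by push_cast; ring
    rw [hc1, pv_foldA distances fuel mpg m]
    have hc2 : (m : Int) + 1 - 1 = (m : Int) := by ring
    rw [hc2]
    have hrange : (PySem.List.pyRange 0 (m : Int) 1).map
        (fun i => PySem.List.pyGetD fuel i 0 * mpg - PySem.List.pyGetD distances i 0)
        = (List.range m).map (fun i => fuel.getD i 0 * mpg - distances.getD i 0) := by
      rw [PySem.List.pyRange_one]
      rw [List.map_map]
      have hm : ((m : Int) - 0).toNat = m := by omega
      rw [hm]
      apply List.map_congr_left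
      intro k _
      simp [PySem.List.pyGetD_natCast]
    rw [hrange, List.foldl_reverse]
    have : (List.foldr (fun (d : Int) (st : Int × Int) =>
        if d + st.2 < 0 then (st.1 + 1, d + st.2) else (0, 0)) (0, 0)
        ((List.range m).map fun i => fuel.getD i 0 * mpg - distances.getD i 0))
        = pvG ((List.range m).map fun i => fuel.getD i 0 * mpg - distances.getD i 0) := by
      rw [← pvG_eq_foldr]
    rw [this]
    exact (pv_agree distances fuel mpg m).symm
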